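-- pv_equiv track=rewrite | github.com/ayoubzulfiqar/Leetcode-Medium | FriendsWithNoMutualFriends/friends_with_no_mutual_friends.py | friends_with_no_mutual_friends
-- ===== SOURCE A (Python) =====
-- import collections
--
-- def friends_with_no_mutual_friends(friendships):
--     graph = collections.defaultdict(set)
--     for p1, p2 in friendships:
--         graph[p1].add(p2)
--         graph[p2].add(p1)
--
--     result_pairs = set()
--
--     for p1, p2 in friendships:
--         mutual_friends = graph[p1].intersection(graph[p2])
--
--         if not mutual_friends:
--             sorted_pair = tuple(sorted((p1, p2)))
--             result_pairs.add(sorted_pair)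
--
--     return sorted(list(result_pairs))
-- ===== SOURCE B (Python) =====
-- import collections
--
-- def friends_with_no_mutual_friends(friendships):
--     graph = collections.defaultdict(set)
--     for p1, p2 in friendships:
--         graph[p1].add(p2)
--         graph[p2].add(p1)
--
--     # mark every edge that has a common neighbour, node-centrically:
--     # for each person u, every ordered pair (a, b) of distinct friends of u
--     # that is itself an edge lies in a "triangle" through u.
--     has_mutual = set()
--     for u, friends in graph.items():
--         for a in friends:
--             for b in friends:
--                 if a != b and b in graph[a]:
--                     has_mutual.add((a, b) if a <= b else (b, a))
--
--     result = set()
--     for p1, p2 in friendships: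
--         pair = (p1, p2) if p1 <= p2 else (p2, p1)
--         if p1 != p2 and pair not in has_mutual:
--             result.add(pair)
--     return sorted(result)
-- ===== Notes on version B (the rewrite author's own statement) =====
-- stated objective: alternative
-- what changed: Instead of computing a set intersection of the two endpoints' neighbour sets for every edge, B marks once, node-centrically, every edge that lies in a triangle (for each person u, each ordered pair of distinct friends of u that is itself an edge) and then keeps the friendship pairs that are not marked.
import Mathlib
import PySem

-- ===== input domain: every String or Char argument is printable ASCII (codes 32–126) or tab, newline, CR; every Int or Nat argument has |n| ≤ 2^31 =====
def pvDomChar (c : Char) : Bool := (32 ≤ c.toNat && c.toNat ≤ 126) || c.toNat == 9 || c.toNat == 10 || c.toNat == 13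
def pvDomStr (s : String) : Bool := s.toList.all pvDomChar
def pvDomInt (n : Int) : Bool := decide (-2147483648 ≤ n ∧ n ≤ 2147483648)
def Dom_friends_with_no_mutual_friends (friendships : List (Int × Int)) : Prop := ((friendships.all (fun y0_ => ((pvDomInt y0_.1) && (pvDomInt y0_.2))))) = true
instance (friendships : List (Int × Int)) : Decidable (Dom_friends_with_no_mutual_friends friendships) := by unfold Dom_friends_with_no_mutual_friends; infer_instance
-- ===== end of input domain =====

-- B replaces A's per-edge neighbour-set intersection by a one-time node-centric marking of all
-- edges lying in a triangle (objective: alternative algorithm, similar cost).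

-- ===== PORT A =====
-- shared helper: both Pythons build `graph = collections.defaultdict(set)` with the identical loop
def pvGraph (friendships : List (Int × Int)) : PySem.Dict Int (PySem.Set Int) :=
  friendships.foldl
    (fun g e =>
      (g.modify e.1 PySem.Set.empty (fun s => PySem.Set.add s e.2)).modify e.2 PySem.Set.empty
        (fun s => PySem.Set.add s e.1))
    PySem.Dict.empty

-- tuple(sorted((p1, p2))) — exact for a 2-tuple of ints
def pvSortPair (e : Int × Int) : Int × Int := if e.1 ≤ e.2 then (e.1, e.2) else (e.2, e.1)

def friends_with_no_mutual_friends (friendships : List (Int × Int)) : List (Int × Int) :=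
  let graph := pvGraph friendships
  let result_pairs : PySem.Set (Int × Int) :=
    friendships.foldl
      (fun r e =>
        let mutual_friends :=
          PySem.Set.inter (graph.getD e.1 PySem.Set.empty) (graph.getD e.2 PySem.Set.empty)
        if mutual_friends = [] then PySem.Set.add r (pvSortPair e) else r)
      PySem.Set.empty
  PySem.List.sorted2 result_pairs (fun p => p.1) (fun p => p.2)

-- ===== PORT B =====
def friends_with_no_mutual_friends_alt (friendships : List (Int × Int)) : List (Int × Int) :=
  let graph := pvGraph friendships
  let has_mutual : PySem.Set (Int × Int) :=
    graph.items.foldl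
      (fun hm uf =>
        uf.2.foldl
          (fun hm a =>
            uf.2.foldl
              (fun hm b =>
                if a ≠ b ∧ b ∈ graph.getD a PySem.Set.empty then
                  PySem.Set.add hm (pvSortPair (a, b))
                else hm)
              hm)
          hm)
      PySem.Set.empty
  let result : PySem.Set (Int × Int) :=
    friendships.foldl
      (fun r e =>
        let pair := pvSortPair e
        if e.1 ≠ e.2 ∧ pair ∉ has_mutual then PySem.Set.add r pair else r)
      PySem.Set.empty
  PySem.List.sorted2 result (fun p => p.1) (fun p => p.2)

-- ===== PRECONDITION & SPEC =====
def Spec_friends_with_no_mutual_friends (friendships : List (Int × Int)) (out : List (Int × Int)) : Prop := out = friends_with_no_mutual_friends_alt friendships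
instance (friendships : List (Int × Int)) (out : List (Int × Int)) : Decidable (Spec_friends_with_no_mutual_friends friendships out) := by unfold Spec_friends_with_no_mutual_friends; infer_instance

-- ===== CLAIM (what is proved, stated in full; the proofs are below) =====
def Claim_equal_friends_with_no_mutual_friends : Prop := ∀ (friendships : List (Int × Int)), Dom_friends_with_no_mutual_friends friendships → Spec_friends_with_no_mutual_friends friendships (friends_with_no_mutual_friends friendships)

-- ===== LEMMAS AND PROOFS =====

-- generic: membership through a foldl whose step adds elements described by P
theorem pv_mem_foldl {α β : Type} (step : List α → β → List α) (P : β → α → Prop)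
    (hstep : ∀ s b y, y ∈ step s b ↔ y ∈ s ∨ P b y) :
    ∀ (l : List β) (s : List α) (y : α),
      y ∈ l.foldl step s ↔ y ∈ s ∨ ∃ b ∈ l, P b y := by
  intro l
  induction l with
  | nil => simp
  | cons b l ih =>
    intro s y
    simp only [List.foldl_cons, ih, hstep, List.mem_cons]
    constructor
    · rintro ((h | h) | ⟨c, hc, hp⟩)
      · exact Or.inl h
      · exact Or.inr ⟨b, Or.inl rfl, h⟩
      · exact Or.inr ⟨c, Or.inr hc, hp⟩
    · rintro (h | ⟨c, (rfl | hc), hp⟩)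
      · exact Or.inl (Or.inl h)
      · exact Or.inl (Or.inr hp)
      · exact Or.inr ⟨c, hc, hp⟩

-- generic: a property preserved by every step is preserved by the foldl
theorem pv_foldl_pres {α β : Type} (step : α → β → α) (Q : α → Prop)
    (h : ∀ s b, Q s → Q (step s b)) :
    ∀ (l : List β) (s : α), Q s → Q (l.foldl step s) := by
  intro l
  induction l with
  | nil => intro s hs; exact hs
  | cons b l ih => intro s hs; exact ih _ (h s b hs)

-- getD through a modify, as one if
theorem pv_getD_modify (d : PySem.Dict Int (PySem.Set Int)) (k v : Int)
    (d0 : PySem.Set Int) (f : PySem.Set Int → PySem.Set Int) :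
    (d.modify k d0 f).getD v d0 = if v = k then f (d.getD k d0) else d.getD v d0 := by
  split_ifs with h
  · subst h; exact PySem.Dict.getD_modify_self d v d0 f
  · exact PySem.Dict.getD_modify_of_ne d d0 f h

-- keys membership through a modify
theorem pv_mem_keys_modify (d : PySem.Dict Int (PySem.Set Int)) (k v : Int)
    (d0 : PySem.Set Int) (f : PySem.Set Int → PySem.Set Int) :
    v ∈ (d.modify k d0 f).keys ↔ v = k ∨ v ∈ d.keys := by
  rw [PySem.Dict.keys_modify, PySem.Dict.mem_keys_insert]

theorem pv_nodup_keys_modify (d : PySem.Dict Int (PySem.Set Int)) (k : Int)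
    (d0 : PySem.Set Int) (f : PySem.Set Int → PySem.Set Int) (h : d.keys.Nodup) :
    (d.modify k d0 f).keys.Nodup := by
  rw [PySem.Dict.keys_modify]
  exact PySem.Dict.nodup_keys_insert _ _ _ h

-- adjacency characterisation of the shared graph build
theorem pv_mem_graph_aux :
    ∀ (fs : List (Int × Int)) (g : PySem.Dict Int (PySem.Set Int)) (v w : Int),
      w ∈ (fs.foldl
        (fun g e =>
          (g.modify e.1 PySem.Set.empty (fun s => PySem.Set.add s e.2)).modify e.2 PySem.Set.empty
            (fun s => PySem.Set.add s e.1)) g).getD v PySem.Set.empty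
        ↔ w ∈ g.getD v PySem.Set.empty ∨ (v, w) ∈ fs ∨ (w, v) ∈ fs := by
  intro fs
  induction fs with
  | nil => simp
  | cons e fs ih =>
    intro g v w
    rcases e with ⟨x, y⟩
    simp only [List.foldl_cons, ih, List.mem_cons, pv_getD_modify]
    split_ifs <;> subst_vars <;> simp only [PySem.Set.mem_add, Prod.mk.injEq] <;> tauto

theorem pv_mem_graph (fs : List (Int × Int)) (v w : Int) :
    w ∈ (pvGraph fs).getD v PySem.Set.empty ↔ (v, w) ∈ fs ∨ (w, v) ∈ fs := by
  unfold pvGraph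
  rw [pv_mem_graph_aux]
  simp [PySem.Dict.getD_empty, PySem.Set.empty]

-- keys characterisation of the shared graph build
theorem pv_mem_keys_aux :
    ∀ (fs : List (Int × Int)) (g : PySem.Dict Int (PySem.Set Int)) (v : Int),
      v ∈ (fs.foldl
        (fun g e =>
          (g.modify e.1 PySem.Set.empty (fun s => PySem.Set.add s e.2)).modify e.2 PySem.Set.empty
            (fun s => PySem.Set.add s e.1)) g).keys
        ↔ v ∈ g.keys ∨ ∃ e ∈ fs, v = e.1 ∨ v = e.2 := by
  intro fs
  induction fs with
  | nil => simp
  | cons e fs ih =>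
    intro g v
    simp only [List.foldl_cons, ih, pv_mem_keys_modify, List.mem_cons]
    constructor
    · rintro ((h | h | h) | ⟨c, hc, hvc⟩)
      · exact Or.inr ⟨e, Or.inl rfl, Or.inr h⟩
      · exact Or.inr ⟨e, Or.inl rfl, Or.inl h⟩
      · exact Or.inl h
      · exact Or.inr ⟨c, Or.inr hc, hvc⟩
    · rintro (h | ⟨c, (rfl | hc), hvc⟩)
      · exact Or.inl (Or.inr (Or.inr h))
      · rcases hvc with h | h
        · exact Or.inl (Or.inr (Or.inl h))
        · exact Or.inl (Or.inl h)
      · exact Or.inr ⟨c, hc, hvc⟩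

theorem pv_mem_keys (fs : List (Int × Int)) (v : Int) :
    v ∈ (pvGraph fs).keys ↔ ∃ e ∈ fs, v = e.1 ∨ v = e.2 := by
  unfold pvGraph
  rw [pv_mem_keys_aux]
  simp [PySem.Dict.keys_empty]

theorem pv_nodup_keys (fs : List (Int × Int)) : (pvGraph fs).keys.Nodup := by
  unfold pvGraph
  refine pv_foldl_pres _ (fun d : PySem.Dict Int (PySem.Set Int) => d.keys.Nodup) ?_ fs _
    PySem.Dict.nodup_keys_empty
  intro d e hd
  exact pv_nodup_keys_modify _ _ _ _ (pv_nodup_keys_modify _ _ _ _ hd)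

-- symmetric edge relation read off the graph
def pvAdj (fs : List (Int × Int)) (v w : Int) : Prop := (v, w) ∈ fs ∨ (w, v) ∈ fs

theorem pvAdj_symm {fs : List (Int × Int)} {v w : Int} (h : pvAdj fs v w) : pvAdj fs w v :=
  h.symm

-- membership in B's has_mutual set
theorem pv_mem_has_mutual (fs : List (Int × Int)) (q : Int × Int) :
    q ∈ (pvGraph fs).items.foldl
        (fun hm uf =>
          uf.2.foldl
            (fun hm a =>
              uf.2.foldl
                (fun hm b =>
                  if a ≠ b ∧ b ∈ (pvGraph fs).getD a PySem.Set.empty then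
                    PySem.Set.add hm (pvSortPair (a, b))
                  else hm)
                hm)
            hm)
        PySem.Set.empty
      ↔ ∃ u a b : Int, (∃ e ∈ fs, u = e.1 ∨ u = e.2) ∧ pvAdj fs u a ∧ pvAdj fs u b ∧
          a ≠ b ∧ pvAdj fs a b ∧ q = pvSortPair (a, b) := by
  have hinner : ∀ (a : Int) (l : List Int) (s : PySem.Set (Int × Int)) (y : Int × Int),
      y ∈ l.foldl
        (fun hm b =>
          if a ≠ b ∧ b ∈ (pvGraph fs).getD a PySem.Set.empty then
            PySem.Set.add hm (pvSortPair (a, b))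
          else hm) s
        ↔ y ∈ s ∨ ∃ b ∈ l, (a ≠ b ∧ b ∈ (pvGraph fs).getD a PySem.Set.empty)
            ∧ y = pvSortPair (a, b) := by
    intro a l s y
    refine pv_mem_foldl _
      (fun b y => (a ≠ b ∧ b ∈ (pvGraph fs).getD a PySem.Set.empty) ∧ y = pvSortPair (a, b))
      ?_ l s y
    intro s b y
    split_ifs with hc
    · simp only [PySem.Set.mem_add]; tauto
    · tauto
  have hmid : ∀ (fr : List Int) (s : PySem.Set (Int × Int)) (y : Int × Int),
      y ∈ fr.foldl
        (fun hm a =>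
          fr.foldl
            (fun hm b =>
              if a ≠ b ∧ b ∈ (pvGraph fs).getD a PySem.Set.empty then
                PySem.Set.add hm (pvSortPair (a, b))
              else hm) hm) s
        ↔ y ∈ s ∨ ∃ a ∈ fr, ∃ b ∈ fr, (a ≠ b ∧ b ∈ (pvGraph fs).getD a PySem.Set.empty)
            ∧ y = pvSortPair (a, b) := by
    intro fr s y
    exact pv_mem_foldl _ _ (fun s a y => hinner a fr s y) fr s y
  rw [pv_mem_foldl _
      (fun uf y => ∃ a ∈ uf.2, ∃ b ∈ uf.2,
        (a ≠ b ∧ b ∈ (pvGraph fs).getD a PySem.Set.empty) ∧ y = pvSortPair (a, b))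
      (fun s uf y => hmid uf.2 s y)]
  simp only [PySem.Set.empty, List.not_mem_nil, false_or]
  rw [PySem.Dict.items_eq_map_keys _ (pv_nodup_keys fs) PySem.Set.empty]
  constructor
  · rintro ⟨uf, huf, a, ha, b, hb, ⟨hab, hedge⟩, rfl⟩
    rcases List.mem_map.mp huf with ⟨u, hu, rfl⟩
    exact ⟨u, a, b, (pv_mem_keys fs u).mp hu, (pv_mem_graph fs u a).mp ha,
      (pv_mem_graph fs u b).mp hb, hab, (pv_mem_graph fs a b).mp hedge, rfl⟩
  · rintro ⟨u, a, b, hu, ha, hb, hab, hedge, rfl⟩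
    exact ⟨(u, (pvGraph fs).getD u PySem.Set.empty),
      List.mem_map.mpr ⟨u, (pv_mem_keys fs u).mpr hu, rfl⟩,
      a, (pv_mem_graph fs u a).mpr ha, b, (pv_mem_graph fs u b).mpr hb,
      ⟨hab, (pv_mem_graph fs a b).mpr hedge⟩, rfl⟩

-- pvSortPair facts
theorem pv_sortPair_cases (a b x y : Int) (h : pvSortPair (a, b) = pvSortPair (x, y)) :
    (a = x ∧ b = y) ∨ (a = y ∧ b = x) := by
  unfold pvSortPair at h
  dsimp only at h
  split_ifs at h <;> simp only [Prod.mk.injEq] at h <;> omega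

-- the per-edge condition equivalence: no common neighbour ↔ (not a self loop and unmarked)
theorem pv_edge_iff (fs : List (Int × Int)) (e : Int × Int) (he : e ∈ fs) :
    (∀ w : Int, ¬ (pvAdj fs e.1 w ∧ pvAdj fs e.2 w)) ↔
      (e.1 ≠ e.2 ∧ ¬ ∃ u a b : Int, (∃ e' ∈ fs, u = e'.1 ∨ u = e'.2) ∧ pvAdj fs u a ∧
        pvAdj fs u b ∧ a ≠ b ∧ pvAdj fs a b ∧ pvSortPair e = pvSortPair (a, b)) := by
  rcases e with ⟨x, y⟩
  dsimp only
  have hxy : pvAdj fs x y := Or.inl he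
  constructor
  · intro hno
    constructor
    · rintro rfl
      exact hno x ⟨hxy, hxy⟩
    · rintro ⟨u, a, b, _, hua, hub, hab, _, hq⟩
      rcases pv_sortPair_cases a b x y hq.symm with ⟨rfl, rfl⟩ | ⟨rfl, rfl⟩
      · exact hno u ⟨pvAdj_symm hua, pvAdj_symm hub⟩
      · exact hno u ⟨pvAdj_symm hub, pvAdj_symm hua⟩
  · rintro ⟨hself, hnomark⟩ w ⟨h1, h2⟩
    refine hnomark ⟨w, x, y, ?_, pvAdj_symm h1, pvAdj_symm h2, hself, hxy, rfl⟩
    rcases h1 with h | h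
    · exact ⟨(x, w), h, Or.inr rfl⟩
    · exact ⟨(w, x), h, Or.inl rfl⟩

-- lexicographic order on Int pairs; sorted2 output is pairwise in it
def pvLexLe (a b : Int × Int) : Prop := a.1 < b.1 ∨ (a.1 = b.1 ∧ a.2 ≤ b.2)

theorem pv_pairwise_insertBy (bef : Int × Int → Int × Int → Bool)
    (hbt : ∀ a b, bef a b = true → pvLexLe a b)
    (hbf : ∀ a b, bef a b = false → pvLexLe b a)
    (htr : ∀ a b c, pvLexLe a b → pvLexLe b c → pvLexLe a c)
    (x : Int × Int) :
    ∀ (l : List (Int × Int)), l.Pairwise pvLexLe →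
      (PySem.List.insertBy bef x l).Pairwise pvLexLe := by
  intro l
  induction l with
  | nil => intro _; simp [PySem.List.insertBy]
  | cons y ys ih =>
    intro hl
    rw [List.pairwise_cons] at hl
    show (if bef x y = true then x :: y :: ys else y :: PySem.List.insertBy bef x ys).Pairwise _
    split_ifs with hb
    · refine List.Pairwise.cons ?_ (List.Pairwise.cons hl.1 hl.2)
      intro z hz
      rcases List.mem_cons.mp hz with rfl | hz
      · exact hbt _ _ hb
      · exact htr _ _ _ (hbt _ _ hb) (hl.1 z hz)
    · refine List.Pairwise.cons ?_ (ih hl.2)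
      intro z hz
      rcases (PySem.List.mem_insertBy _ _ _ _).mp hz with rfl | hz
      · exact hbf _ _ (by simpa using hb)
      · exact hl.1 z hz

theorem pv_pairwise_sorted2 (xs : List (Int × Int)) :
    (PySem.List.sorted2 xs (fun p => p.1) (fun p => p.2)).Pairwise pvLexLe := by
  show (List.foldl _ [] xs).Pairwise pvLexLe
  refine pv_foldl_pres _ (fun l : List (Int × Int) => l.Pairwise pvLexLe) ?_ xs [] (by simp)
  intro s b hs
  refine pv_pairwise_insertBy _ ?_ ?_ ?_ b s hs
  · intro a b h
    unfold pvLexLe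
    revert h
    cases hd1 : decide (a.1 < b.1) <;> cases hd2 : decide (b.1 < a.1) <;>
      cases hd3 : decide (a.2 < b.2) <;> simp_all
    omega
  · intro a b h
    unfold pvLexLe
    revert h
    cases hd1 : decide (a.1 < b.1) <;> cases hd2 : decide (b.1 < a.1) <;>
      cases hd3 : decide (a.2 < b.2) <;> simp_all
    omega
  · intro a b c h1 h2
    unfold pvLexLe at *
    omega

theorem pv_sorted2_eq_of_perm (xs ys : List (Int × Int)) (h : xs.Perm ys) :
    PySem.List.sorted2 xs (fun p => p.1) (fun p => p.2)
      = PySem.List.sorted2 ys (fun p => p.1) (fun p => p.2) := by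
  have hperm : (PySem.List.sorted2 xs (fun p => p.1) (fun p => p.2)).Perm
      (PySem.List.sorted2 ys (fun p => p.1) (fun p => p.2)) :=
    ((PySem.List.sorted2_perm xs _ _ false).trans h).trans
      (PySem.List.sorted2_perm ys _ _ false).symm
  refine hperm.eq_of_pairwise ?_ (pv_pairwise_sorted2 xs) (pv_pairwise_sorted2 ys)
  intro a b _ _ h1 h2
  unfold pvLexLe at h1 h2
  have h3 : a.1 = b.1 ∧ a.2 = b.2 := by omega
  exact Prod.ext h3.1 h3.2

-- ===== MAIN PROOF =====
theorem pv_main (fs : List (Int × Int)) :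
    friends_with_no_mutual_friends fs = friends_with_no_mutual_friends_alt fs := by
  unfold friends_with_no_mutual_friends friends_with_no_mutual_friends_alt
  dsimp only
  apply pv_sorted2_eq_of_perm
  have hstepA : ∀ (s : PySem.Set (Int × Int)) (e : Int × Int) (y : Int × Int),
      y ∈ (if PySem.Set.inter ((pvGraph fs).getD e.1 PySem.Set.empty)
              ((pvGraph fs).getD e.2 PySem.Set.empty) = [] then
            PySem.Set.add s (pvSortPair e) else s)
        ↔ y ∈ s ∨ ((PySem.Set.inter ((pvGraph fs).getD e.1 PySem.Set.empty)
              ((pvGraph fs).getD e.2 PySem.Set.empty) = []) ∧ y = pvSortPair e) := by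
    intro s e y
    split_ifs with hc
    · simp only [PySem.Set.mem_add]; tauto
    · tauto
  have hstepB : ∀ (s : PySem.Set (Int × Int)) (e : Int × Int) (y : Int × Int),
      y ∈ (if e.1 ≠ e.2 ∧ pvSortPair e ∉ (pvGraph fs).items.foldl
              (fun hm uf =>
                uf.2.foldl
                  (fun hm a =>
                    uf.2.foldl
                      (fun hm b =>
                        if a ≠ b ∧ b ∈ (pvGraph fs).getD a PySem.Set.empty then
                          PySem.Set.add hm (pvSortPair (a, b))
                        else hm)
                      hm)
                  hm)
              PySem.Set.empty then
            PySem.Set.add s (pvSortPair e) else s)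
        ↔ y ∈ s ∨ ((e.1 ≠ e.2 ∧ pvSortPair e ∉ (pvGraph fs).items.foldl
              (fun hm uf =>
                uf.2.foldl
                  (fun hm a =>
                    uf.2.foldl
                      (fun hm b =>
                        if a ≠ b ∧ b ∈ (pvGraph fs).getD a PySem.Set.empty then
                          PySem.Set.add hm (pvSortPair (a, b))
                        else hm)
                      hm)
                  hm)
              PySem.Set.empty) ∧ y = pvSortPair e) := by
    intro s e y
    split_ifs with hc
    · simp only [PySem.Set.mem_add]; tauto
    · tauto
  rw [List.perm_ext_iff_of_nodup
    (pv_foldl_pres _ List.Nodup (by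
      intro s e hs
      split_ifs with h
      · exact PySem.Set.nodup_add _ _ hs
      · exact hs) fs _ (by simp [PySem.Set.empty]))
    (pv_foldl_pres _ List.Nodup (by
      intro s e hs
      split_ifs with h
      · exact PySem.Set.nodup_add _ _ hs
      · exact hs) fs _ (by simp [PySem.Set.empty]))]
  intro q
  rw [pv_mem_foldl _ _ hstepA fs PySem.Set.empty q, pv_mem_foldl _ _ hstepB fs PySem.Set.empty q]
  simp only [pv_mem_has_mutual fs]
  have hcond : ∀ e : Int × Int,
      (PySem.Set.inter ((pvGraph fs).getD e.1 PySem.Set.empty)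
        ((pvGraph fs).getD e.2 PySem.Set.empty) = [])
      ↔ ∀ w : Int, ¬ (pvAdj fs e.1 w ∧ pvAdj fs e.2 w) := by
    intro e
    rw [List.eq_nil_iff_forall_not_mem]
    constructor
    · intro h w hw
      exact h w ((PySem.Set.mem_inter _ _ w).mpr
        ⟨(pv_mem_graph fs e.1 w).mpr hw.1, (pv_mem_graph fs e.2 w).mpr hw.2⟩)
    · intro h w hw
      rcases (PySem.Set.mem_inter _ _ w).mp hw with ⟨h1, h2⟩
      exact h w ⟨(pv_mem_graph fs e.1 w).mp h1, (pv_mem_graph fs e.2 w).mp h2⟩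
  constructor
  · rintro (h | ⟨e, he, hc, rfl⟩)
    · exact absurd h (by simp [PySem.Set.empty])
    · exact Or.inr ⟨e, he, (pv_edge_iff fs e he).mp ((hcond e).mp hc), rfl⟩
  · rintro (h | ⟨e, he, hBc, rfl⟩)
    · exact absurd h (by simp [PySem.Set.empty])
    · exact Or.inr ⟨e, he, (hcond e).mpr ((pv_edge_iff fs e he).mpr hBc), rfl⟩

-- ===== VERDICT (by name: the statement is the Claim_ definition above) =====
theorem friends_with_no_mutual_friends_spec : Claim_equal_friends_with_no_mutual_friends := by
  intro fs _
  unfold Spec_friends_with_no_mutual_friends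
  exact pv_main fs
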